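-- pv_equiv track=rewrite | github.com/imruchi/nlp | scripts/mechanistic_interpretability.py | _find_financial_data_region
-- ===== SOURCE A (Python) =====
-- from typing import Dict, List, Tuple, Optional, Any
--
-- def _find_financial_data_region(tokens: List[str]) -> Tuple[Optional[int], Optional[int]]:
--     """Find the token range containing financial statement data."""
--
--     # Look for start markers
--     start_markers = ["Balance", "Sheet", "Income", "Statement", "Account", "Items"]
--     end_markers = ["Solve", "this", "problem", "step", "by", "step"]
--
--     start_pos = None
--     end_pos = None
--
--     # Find start of financial data
--     for i, token in enumerate(tokens):
--         if any(marker.lower() in token.lower() for marker in start_markers):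
--             start_pos = max(0, i - 5)  # Start a bit before the marker
--             break
--
--     # Find end of financial data (where analysis instructions begin)
--     for i, token in enumerate(tokens):
--         if any(marker.lower() in token.lower() for marker in end_markers):
--             end_pos = min(len(tokens), i + 5)  # End a bit after the marker
--             break
--
--     # If we found both markers, return the range
--     if start_pos is not None and end_pos is not None and end_pos > start_pos:
--         # Limit to reasonable size for visualization
--         max_region_size = 200
--         if end_pos - start_pos > max_region_size:
--             end_pos = start_pos + max_region_size
--         return start_pos, end_pos
--
--     # Fallback: look for numerical data patterns
--     numeric_positions = []
--     for i, token in enumerate(tokens):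
--         # Look for tokens that contain numbers or financial indicators
--         if any(char.isdigit() for char in token) or \
--            any(financial_word in token.lower() for financial_word in
--                ['asset', 'liability', 'sales', 'revenue', 'income', 'cash', 'debt']):
--             numeric_positions.append(i)
--
--     if len(numeric_positions) > 10:  # If we found enough financial data
--         start_pos = max(0, min(numeric_positions) - 10)
--         end_pos = min(len(tokens), max(numeric_positions) + 10)
--
--         # Limit to reasonable size
--         max_region_size = 200
--         if end_pos - start_pos > max_region_size:
--             end_pos = start_pos + max_region_size
--
--         return start_pos, end_pos
--
--     return None, None
-- ===== SOURCE B (Python) =====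
-- def _find_financial_data_region(tokens):
--     """Find the token range containing financial statement data (single fused pass)."""
--     start_markers = ["balance", "sheet", "income", "statement", "account", "items"]
--     end_markers = ["solve", "this", "problem", "step", "by", "step"]
--     financial_words = ['asset', 'liability', 'sales', 'revenue', 'income', 'cash', 'debt']
--
--     start_i = None
--     end_i = None
--     numeric_positions = []
--
--     # One pass: first start-marker index, first end-marker index, numeric positions.
--     for i, token in enumerate(tokens):
--         low = token.lower()
--         if start_i is None and any(m in low for m in start_markers):
--             start_i = i
--         if end_i is None and any(m in low for m in end_markers):
--             end_i = i
--         if any(c.isdigit() for c in token) or any(w in low for w in financial_words):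
--             numeric_positions.append(i)
--
--     n = len(tokens)
--     if start_i is not None and end_i is not None:
--         s = max(0, start_i - 5)
--         e = min(n, end_i + 5)
--         if e > s:
--             return s, min(e, s + 200)
--
--     if len(numeric_positions) > 10:
--         # positions were collected in increasing order: min is first, max is last
--         s = max(0, numeric_positions[0] - 10)
--         e = min(n, numeric_positions[-1] + 10)
--         return s, min(e, s + 200)
--
--     return None, None
-- ===== Notes on version B (the rewrite author's own statement) =====
-- stated objective: alternative
-- what changed: A's three separate scans over tokens (start markers, end markers, numeric positions) are fused into one pass maintaining all three accumulators, and the fallback reads the first/last collected position instead of min()/max() since positions are collected in increasing order.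
import Mathlib
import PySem

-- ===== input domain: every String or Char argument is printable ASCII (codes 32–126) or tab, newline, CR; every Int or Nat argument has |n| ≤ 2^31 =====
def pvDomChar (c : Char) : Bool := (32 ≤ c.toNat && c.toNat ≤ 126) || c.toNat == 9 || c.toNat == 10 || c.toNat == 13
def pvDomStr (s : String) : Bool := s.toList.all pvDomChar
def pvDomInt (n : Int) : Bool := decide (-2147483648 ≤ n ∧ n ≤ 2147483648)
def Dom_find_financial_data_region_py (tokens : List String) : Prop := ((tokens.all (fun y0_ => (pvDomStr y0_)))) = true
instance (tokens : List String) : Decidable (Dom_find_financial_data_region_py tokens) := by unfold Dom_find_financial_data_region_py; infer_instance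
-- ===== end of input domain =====

-- B fuses A's three separate scans over the tokens into one pass that maintains the first
-- start-marker index, the first end-marker index and the numeric positions together (objective:
-- alternative decomposition; same post-loop arithmetic, with list ends instead of min/max since
-- the collected positions are increasing).

-- ===== PORT A =====
def pvStartPredA (token : String) : Bool :=
  (["Balance", "Sheet", "Income", "Statement", "Account", "Items"]).any
    (fun m => PySem.Str.isIn (PySem.Str.lower m) (PySem.Str.lower token))

def pvEndPredA (token : String) : Bool :=
  (["Solve", "this", "problem", "step", "by", "step"]).any
    (fun m => PySem.Str.isIn (PySem.Str.lower m) (PySem.Str.lower token))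

def pvNumPredA (token : String) : Bool :=
  token.toList.any PySem.Chars.isdigit ||
  (["asset", "liability", "sales", "revenue", "income", "cash", "debt"]).any
    (fun w => PySem.Str.isIn w (PySem.Str.lower token))

-- first loop: break with start_pos = max(0, i - 5)
def pvScanStartA (tokens : List String) (i : Int) : Option Int :=
  match tokens with
  | [] => none
  | t :: rest => if pvStartPredA t then some (max 0 (i - 5)) else pvScanStartA rest (i + 1)

-- second loop: break with end_pos = min(len(tokens), i + 5)
def pvScanEndA (n : Int) (tokens : List String) (i : Int) : Option Int :=
  match tokens with
  | [] => none
  | t :: rest => if pvEndPredA t then some (min n (i + 5)) else pvScanEndA n rest (i + 1)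

-- third loop: collect numeric_positions
def pvNumLoopA (tokens : List String) (i : Int) (acc : List Int) : List Int :=
  match tokens with
  | [] => acc
  | t :: rest => pvNumLoopA rest (i + 1) (if pvNumPredA t then acc ++ [i] else acc)

def pvFallbackA (tokens : List String) : Option Int × Option Int :=
  let nums := pvNumLoopA tokens 0 []
  if (nums.length : Int) > 10 then
    match PySem.List.min? nums (fun x => x), PySem.List.max? nums (fun x => x) with
    | some mn, some mx =>
      let s := max 0 (mn - 10)
      let e := min (tokens.length : Int) (mx + 10)
      (some s, some (if e - s > 200 then s + 200 else e))
    | _, _ => (none, none)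
  else (none, none)

def find_financial_data_region_py (tokens : List String) : Option Int × Option Int :=
  let start_pos := pvScanStartA tokens 0
  let end_pos := pvScanEndA (tokens.length : Int) tokens 0
  match start_pos, end_pos with
  | some s, some e =>
    if e > s then (some s, some (if e - s > 200 then s + 200 else e))
    else pvFallbackA tokens
  | _, _ => pvFallbackA tokens

-- ===== PORT B =====
def pvStartPredB (low : String) : Bool :=
  (["balance", "sheet", "income", "statement", "account", "items"]).any
    (fun m => PySem.Str.isIn m low)

def pvEndPredB (low : String) : Bool :=
  (["solve", "this", "problem", "step", "by", "step"]).any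
    (fun m => PySem.Str.isIn m low)

def pvNumPredB (token low : String) : Bool :=
  token.toList.any PySem.Chars.isdigit ||
  (["asset", "liability", "sales", "revenue", "income", "cash", "debt"]).any
    (fun w => PySem.Str.isIn w low)

-- the single fused loop of Source B
def pvLoopB (tokens : List String) (i : Int) (s e : Option Int) (nums : List Int) :
    Option Int × Option Int × List Int :=
  match tokens with
  | [] => (s, e, nums)
  | t :: rest =>
    let low := PySem.Str.lower t
    let s' := if s.isNone && pvStartPredB low then some i else s
    let e' := if e.isNone && pvEndPredB low then some i else e
    let nums' := if pvNumPredB t low then nums ++ [i] else nums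
    pvLoopB rest (i + 1) s' e' nums'

def find_financial_data_region_py_alt (tokens : List String) : Option Int × Option Int :=
  match pvLoopB tokens 0 none none [] with
  | (s?, e?, nums) =>
    let n : Int := tokens.length
    let fallback :=
      if (nums.length : Int) > 10 then
        match PySem.List.pyGet? nums 0, PySem.List.pyGet? nums (-1) with
        | some a, some b =>
          let s := max 0 (a - 10)
          let e := min n (b + 10)
          (some s, some (min e (s + 200)))
        | _, _ => (none, none)
      else (none, none)
    match s?, e? with
    | some si, some ei =>
      let s := max 0 (si - 5)
      let e := min n (ei + 5)
      if e > s then (some s, some (min e (s + 200))) else fallback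
    | _, _ => fallback

-- ===== PRECONDITION & SPEC =====
def Spec_find_financial_data_region_py (tokens : List String) (out : Option Int × Option Int) : Prop := out = find_financial_data_region_py_alt tokens
instance (tokens : List String) (out : Option Int × Option Int) : Decidable (Spec_find_financial_data_region_py tokens out) := by unfold Spec_find_financial_data_region_py; infer_instance

-- ===== CLAIM (what is proved, stated in full; the proofs are below) =====
def Claim_equal_find_financial_data_region_py : Prop := ∀ (tokens : List String), Dom_find_financial_data_region_py tokens → Spec_find_financial_data_region_py tokens (find_financial_data_region_py tokens)

-- ===== LEMMAS AND PROOFS =====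

-- B's pure "first start-marker index from i" / "first end-marker index from i" / "numeric positions from i"
def pvFirstS (tokens : List String) (i : Int) : Option Int :=
  match tokens with
  | [] => none
  | t :: rest => if pvStartPredB (PySem.Str.lower t) then some i else pvFirstS rest (i + 1)

def pvFirstE (tokens : List String) (i : Int) : Option Int :=
  match tokens with
  | [] => none
  | t :: rest => if pvEndPredB (PySem.Str.lower t) then some i else pvFirstE rest (i + 1)

def pvNums (tokens : List String) (i : Int) : List Int :=
  match tokens with
  | [] => []
  | t :: rest =>
    (if pvNumPredB t (PySem.Str.lower t) then [i] else []) ++ pvNums rest (i + 1)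

lemma pvStartPred_eq (t : String) : pvStartPredA t = pvStartPredB (PySem.Str.lower t) := by
  have h1 : PySem.Chars.lower ['B', 'a', 'l', 'a', 'n', 'c', 'e'] = ['b', 'a', 'l', 'a', 'n', 'c', 'e'] := by decide
  have h2 : PySem.Chars.lower ['S', 'h', 'e', 'e', 't'] = ['s', 'h', 'e', 'e', 't'] := by decide
  have h3 : PySem.Chars.lower ['I', 'n', 'c', 'o', 'm', 'e'] = ['i', 'n', 'c', 'o', 'm', 'e'] := by decide
  have h4 : PySem.Chars.lower ['S', 't', 'a', 't', 'e', 'm', 'e', 'n', 't'] = ['s', 't', 'a', 't', 'e', 'm', 'e', 'n', 't'] := by decide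
  have h5 : PySem.Chars.lower ['A', 'c', 'c', 'o', 'u', 'n', 't'] = ['a', 'c', 'c', 'o', 'u', 'n', 't'] := by decide
  have h6 : PySem.Chars.lower ['I', 't', 'e', 'm', 's'] = ['i', 't', 'e', 'm', 's'] := by decide
  simp [pvStartPredA, pvStartPredB, h1, h2, h3, h4, h5, h6]

lemma pvEndPred_eq (t : String) : pvEndPredA t = pvEndPredB (PySem.Str.lower t) := by
  have h1 : PySem.Chars.lower ['S', 'o', 'l', 'v', 'e'] = ['s', 'o', 'l', 'v', 'e'] := by decide
  have h2 : PySem.Chars.lower ['t', 'h', 'i', 's'] = ['t', 'h', 'i', 's'] := by decide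
  have h3 : PySem.Chars.lower ['p', 'r', 'o', 'b', 'l', 'e', 'm'] = ['p', 'r', 'o', 'b', 'l', 'e', 'm'] := by decide
  have h4 : PySem.Chars.lower ['s', 't', 'e', 'p'] = ['s', 't', 'e', 'p'] := by decide
  have h5 : PySem.Chars.lower ['b', 'y'] = ['b', 'y'] := by decide
  simp [pvEndPredA, pvEndPredB, h1, h2, h3, h4, h5]

lemma pvNumPred_eq (t : String) : pvNumPredA t = pvNumPredB t (PySem.Str.lower t) := by
  simp [pvNumPredA, pvNumPredB]

lemma pvLoopB_eq (tokens : List String) : ∀ (i : Int) (s e : Option Int) (nums : List Int),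
    pvLoopB tokens i s e nums =
      ((match s with | some v => some v | none => pvFirstS tokens i),
       (match e with | some v => some v | none => pvFirstE tokens i),
       nums ++ pvNums tokens i) := by
  induction tokens with
  | nil => intro i s e nums; cases s <;> cases e <;> simp [pvLoopB, pvFirstS, pvFirstE, pvNums]
  | cons t rest ih =>
    intro i s e nums
    rw [pvLoopB, ih]
    cases s <;> cases e <;>
      simp only [Option.isNone_none, Option.isNone_some, Bool.true_and, Bool.false_and,
        pvFirstS, pvFirstE, pvNums] <;>
      by_cases hs : pvStartPredB (PySem.Str.lower t) <;>
      by_cases he : pvEndPredB (PySem.Str.lower t) <;>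
      by_cases hn : pvNumPredB t (PySem.Str.lower t) <;>
      simp [hs, he, hn, List.append_assoc]

lemma pvScanStartA_eq (tokens : List String) : ∀ i : Int,
    pvScanStartA tokens i = (pvFirstS tokens i).map (fun j => max 0 (j - 5)) := by
  induction tokens with
  | nil => intro i; simp [pvScanStartA, pvFirstS]
  | cons t rest ih =>
    intro i
    rw [pvScanStartA, pvFirstS, pvStartPred_eq]
    by_cases h : pvStartPredB (PySem.Str.lower t) <;> simp [h, ih]

lemma pvScanEndA_eq (n : Int) (tokens : List String) : ∀ i : Int,
    pvScanEndA n tokens i = (pvFirstE tokens i).map (fun j => min n (j + 5)) := by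
  induction tokens with
  | nil => intro i; simp [pvScanEndA, pvFirstE]
  | cons t rest ih =>
    intro i
    rw [pvScanEndA, pvFirstE, pvEndPred_eq]
    by_cases h : pvEndPredB (PySem.Str.lower t) <;> simp [h, ih]

lemma pvNumLoopA_eq (tokens : List String) : ∀ (i : Int) (acc : List Int),
    pvNumLoopA tokens i acc = acc ++ pvNums tokens i := by
  induction tokens with
  | nil => intro i acc; simp [pvNumLoopA, pvNums]
  | cons t rest ih =>
    intro i acc
    rw [pvNumLoopA, pvNums, pvNumPred_eq]
    by_cases h : pvNumPredB t (PySem.Str.lower t) <;> simp [h, ih, List.append_assoc]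

lemma pvNums_mem_ge (tokens : List String) : ∀ (i m : Int), m ∈ pvNums tokens i → i ≤ m := by
  induction tokens with
  | nil => intro i m h; simp [pvNums] at h
  | cons t rest ih =>
    intro i m h
    rw [pvNums] at h
    rcases List.mem_append.mp h with h1 | h2
    · split at h1 <;> simp at h1; omega
    · have := ih (i + 1) m h2; omega

lemma pvNums_pairwise (tokens : List String) : ∀ i : Int,
    (pvNums tokens i).Pairwise (· < ·) := by
  induction tokens with
  | nil => intro i; simp [pvNums]
  | cons t rest ih =>
    intro i
    rw [pvNums]
    refine List.pairwise_append.mpr ⟨?_, ih (i + 1), ?_⟩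
    · split <;> simp
    · intro a ha b hb
      split at ha <;> simp at ha
      have := pvNums_mem_ge rest (i + 1) b hb
      omega

lemma pvFoldlMin_const (t : List Int) : ∀ a : Int, (∀ m ∈ t, a ≤ m) → t.foldl min a = a := by
  induction t with
  | nil => intro a _; simp
  | cons b t' ih =>
    intro a h
    have hab : a ≤ b := h b (by simp)
    simp only [List.foldl_cons, min_eq_left hab]
    exact ih a (fun m hm => h m (by simp [hm]))

lemma pvFoldlMax_getLast (t : List Int) : ∀ a : Int, t.Pairwise (· ≤ ·) → (∀ m ∈ t, a ≤ m) →
    t.foldl max a = t.getLast?.getD a := by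
  induction t with
  | nil => intro a _ _; simp
  | cons b t' ih =>
    intro a hp h
    have hab : a ≤ b := h b (by simp)
    rw [List.pairwise_cons] at hp
    simp only [List.foldl_cons, max_eq_right hab]
    rw [ih b hp.2 hp.1]
    cases t' with
    | nil => simp
    | cons c t'' =>
      cases hg : (c :: t'').getLast? with
      | none => simp [List.getLast?_eq_none_iff] at hg
      | some gl => simp [hg]

-- A's fallback equals B's fallback
lemma pvFallback_eq (tokens : List String) :
    pvFallbackA tokens =
      (let nums := pvNums tokens 0
       if (nums.length : Int) > 10 then
         match PySem.List.pyGet? nums 0, PySem.List.pyGet? nums (-1) with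
         | some a, some b =>
           let s := max 0 (a - 10)
           let e := min (tokens.length : Int) (b + 10)
           (some s, some (min e (s + 200)))
         | _, _ => (none, none)
       else (none, none)) := by
  rw [pvFallbackA, pvNumLoopA_eq, List.nil_append]
  cases hn : pvNums tokens 0 with
  | nil => simp
  | cons x t =>
    simp only []
    by_cases hlen : ((x :: t).length : Int) > 10
    · have hpw : (x :: t).Pairwise (· < ·) := hn ▸ pvNums_pairwise tokens 0
      rw [List.pairwise_cons] at hpw
      have hxle : ∀ m ∈ t, x ≤ m := fun m hm => le_of_lt (hpw.1 m hm)
      have hmin : PySem.List.min? (x :: t) (fun y => y) = some x := by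
        rw [PySem.List.min?_id_cons, pvFoldlMin_const t x hxle]
      have hmax : PySem.List.max? (x :: t) (fun y => y) = some ((x :: t).getLast?.getD x) := by
        rw [PySem.List.max?_id_cons, pvFoldlMax_getLast t x
          (hpw.2.imp le_of_lt) hxle]
        cases t <;> simp
      rw [if_pos hlen, if_pos hlen, hmin, hmax, PySem.List.pyGet?_zero_cons,
        PySem.List.pyGet?_neg_one]
      cases hgl : (x :: t).getLast? with
      | none => simp [List.getLast?_eq_none_iff] at hgl
      | some gl =>
        simp only [Option.getD_some]
        have : min (min (tokens.length : Int) (gl + 10)) (max 0 (x - 10) + 200) =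
            if min (tokens.length : Int) (gl + 10) - max 0 (x - 10) > 200
            then max 0 (x - 10) + 200 else min (tokens.length : Int) (gl + 10) := by
          split <;> omega
        rw [this]
    · rw [if_neg hlen, if_neg hlen]

-- ===== VERDICT (by name: the statement is the Claim_ definition above) =====
theorem find_financial_data_region_py_spec : Claim_equal_find_financial_data_region_py := by
  intro tokens _
  unfold Spec_find_financial_data_region_py
  rw [find_financial_data_region_py_alt]
  rw [pvLoopB_eq]
  simp only [List.nil_append]
  rw [find_financial_data_region_py]
  rw [pvScanStartA_eq, pvScanEndA_eq, pvFallback_eq]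
  cases hs : pvFirstS tokens 0 <;> cases he : pvFirstE tokens 0 <;>
    simp only [Option.map_none, Option.map_some]
  case some.some si ei =>
    have : (if min (tokens.length : Int) (ei + 5) - max 0 (si - 5) > 200
            then max 0 (si - 5) + 200 else min (tokens.length : Int) (ei + 5)) =
           min (min (tokens.length : Int) (ei + 5)) (max 0 (si - 5) + 200) := by
      split <;> omega
    rw [this]
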